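-- pv_equiv track=rewrite | github.com/muhammadosmanali/Codewars | Data Reverse.py | data_reverse
-- ===== SOURCE A (Python) =====
-- def data_reverse(data):
--     arr1 = []
--     arr2 = []
--     start = 0
--     end = 8
--     for x in range(0, int(len(data)/8)):
--         while start < end:
--             arr1.append(data[start])
--             start+=1
--
--         arr2 += [arr1]
--         arr1 = []
--         start = end
--         end += 8
--
--     arr3 = []
--     for x in range(0, len(arr2)):
--         arr3.append(arr2[len(arr2)-1-x])
--
--     result = []
--     for x in arr3:
--         result += x
--
--     return result
-- ===== SOURCE B (Python) =====
-- def data_reverse(data):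
--     # one-pass index mapping: output position i takes source index (k-1-i//8)*8 + i%8
--     k = len(data) // 8
--     n = 8 * k
--     return [data[(k - 1 - i // 8) * 8 + i % 8] for i in range(n)]
-- ===== Notes on version B (the rewrite author's own statement) =====
-- stated objective: simpler
-- what changed: A builds a list of 8-chunks with an explicit while loop, reverses it with an index loop, and concatenates; B is a single comprehension computing each output element directly from the closed-form source index (k-1-i//8)*8 + i%8, never materialising chunks.
import Mathlib
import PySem

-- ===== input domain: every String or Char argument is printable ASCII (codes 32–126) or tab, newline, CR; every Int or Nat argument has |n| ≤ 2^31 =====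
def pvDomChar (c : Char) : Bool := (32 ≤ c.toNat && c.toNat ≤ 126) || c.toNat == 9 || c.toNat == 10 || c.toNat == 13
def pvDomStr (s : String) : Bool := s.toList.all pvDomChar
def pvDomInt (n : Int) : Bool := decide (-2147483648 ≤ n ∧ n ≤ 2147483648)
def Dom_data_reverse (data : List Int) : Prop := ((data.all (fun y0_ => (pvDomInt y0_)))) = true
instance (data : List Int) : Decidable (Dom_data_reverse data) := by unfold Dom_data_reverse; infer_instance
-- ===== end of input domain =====

-- B replaces A's chunk-list build / reverse loop / concatenation by a single index-mapped
-- comprehension; objective: simpler (same O(n) cost).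

-- ===== PORT A =====
-- the inner 'while start < end: arr1.append(data[start]); start += 1' loop
-- (data[start] is always in range when A reaches it; .getD 0 only makes the recursion total)
def pvWhile (data arr1 : List Int) (start fin : Int) : List Int × Int :=
  if start < fin then
    pvWhile data (arr1 ++ [(PySem.List.pyGet? data start).getD 0]) (start + 1) fin
  else (arr1, start)
termination_by (fin - start).toNat
decreasing_by omega

-- one iteration of A's first for-loop: run the while, arr2 += [arr1], start = end, end += 8
def pvStep (data : List Int) (s : List (List Int) × Int × Int) (_ : Nat) :
    List (List Int) × Int × Int :=
  let p := pvWhile data [] s.2.1 s.2.2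
  (s.1 ++ [p.1], s.2.2, s.2.2 + 8)

def data_reverse (data : List Int) : List Int :=
  let st := (List.range (data.length / 8)).foldl (pvStep data) ([], 0, 8)
  let arr2 := st.1
  let arr3 := (List.range arr2.length).foldl
    (fun (a : List (List Int)) (x : Nat) =>
      a ++ [(PySem.List.pyGet? arr2 ((arr2.length : Int) - 1 - (x : Int))).getD []]) []
  arr3.foldl (· ++ ·) []

-- ===== PORT B =====
def data_reverse_alt (data : List Int) : List Int :=
  let k : Int := PySem.Int.floordiv (data.length : Int) 8
  let n : Int := 8 * k
  (PySem.List.pyRange 0 n 1).map (fun i =>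
    (PySem.List.pyGet? data
      ((k - 1 - PySem.Int.floordiv i 8) * 8 + PySem.Int.mod i 8)).getD 0)

-- ===== PRECONDITION & SPEC =====
def Spec_data_reverse (data : List Int) (out : List Int) : Prop := out = data_reverse_alt data
instance (data : List Int) (out : List Int) : Decidable (Spec_data_reverse data out) := by unfold Spec_data_reverse; infer_instance

-- ===== CLAIM (what is proved, stated in full; the proofs are below) =====
def Claim_equal_data_reverse : Prop := ∀ (data : List Int), Dom_data_reverse data → Spec_data_reverse data (data_reverse data)

-- ===== LEMMAS AND PROOFS =====

-- the window of m elements starting at position s (Nat-indexed getD)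
def pvW (data : List Int) (s m : Nat) : List Int :=
  (List.range m).map (fun j => data.getD (s + j) 0)

theorem pvWhile_eq (data : List Int) (m : Nat) :
    ∀ (s : Nat) (arr1 : List Int),
      pvWhile data arr1 (s : Int) ((s : Int) + (m : Int)) =
        (arr1 ++ pvW data s m, (s : Int) + (m : Int)) := by
  induction m with
  | zero => intro s arr1; rw [pvWhile]; simp [pvW]
  | succ m ih =>
    intro s arr1
    rw [pvWhile]
    have hlt : (s : Int) < (s : Int) + ((m : Int) + 1) := by omega
    simp only [Nat.cast_add, Nat.cast_one, hlt, if_pos]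
    have harg : (s : Int) + 1 = ((s + 1 : Nat) : Int) := by push_cast; ring
    have harg2 : (s : Int) + ((m : Int) + 1) = ((s + 1 : Nat) : Int) + (m : Int) := by
      push_cast; ring
    rw [harg2, harg, ih (s + 1)]
    refine Prod.ext ?_ (by push_cast; ring)
    simp only [List.append_assoc]
    congr 1
    unfold pvW
    rw [List.range_succ_eq_map, List.map_cons, List.map_map]
    simp only [PySem.List.pyGet?_natCast, List.singleton_append]
    congr 1
    apply List.map_congr_left
    intro a _
    simp only [Function.comp, Nat.succ_eq_add_one]
    congr 1
    omega

theorem pvOuter_eq (data : List Int) (k : Nat) :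
    (List.range k).foldl (pvStep data) ([], 0, 8) =
      ((List.range k).map (fun c => pvW data (8 * c) 8),
        ((8 * k : Nat) : Int), ((8 * k : Nat) : Int) + 8) := by
  induction k with
  | zero => simp
  | succ k ih =>
    rw [List.range_succ, List.foldl_append, ih]
    simp only [List.foldl_cons, List.foldl_nil]
    have hw := pvWhile_eq data 8 (8 * k) []
    have hc : ((8 * k : Nat) : Int) + ((8 : Nat) : Int) = ((8 * k : Nat) : Int) + 8 := by
      norm_num
    rw [hc] at hw
    unfold pvStep
    rw [hw]
    simp only [List.nil_append, List.map_append, List.map_singleton]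
    refine Prod.ext rfl (Prod.ext (by push_cast; ring) (by push_cast; ring))

theorem pvRevLoop_eq (arr2 : List (List Int)) :
    (List.range arr2.length).foldl
      (fun (a : List (List Int)) (x : Nat) =>
        a ++ [(PySem.List.pyGet? arr2 ((arr2.length : Int) - 1 - (x : Int))).getD []]) [] =
      arr2.reverse := by
  rw [PySem.List.foldl_append_singleton_eq_map, List.nil_append]
  apply List.ext_getElem
  · simp
  · intro i h1 h2
    simp only [List.length_map, List.length_range] at h1
    simp only [List.length_reverse] at h2
    simp only [List.getElem_map, List.getElem_range, List.getElem_reverse]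
    have hidx : ((arr2.length : Int) - 1 - (i : Int)) = ((arr2.length - 1 - i : Nat) : Int) := by
      omega
    rw [hidx, PySem.List.pyGet?_natCast]
    have hlt : arr2.length - 1 - i < arr2.length := by omega
    rw [List.getElem?_eq_getElem hlt]
    rfl

theorem pvConcat_eq (l : List (List Int)) : ∀ init : List Int,
    l.foldl (· ++ ·) init = init ++ l.flatten := by
  induction l with
  | nil => simp
  | cons x xs ih => intro init; simp [ih, List.append_assoc]

theorem pvMain (data : List Int) (k : Nat) :
    ((List.range k).map (fun c => pvW data (8 * c) 8)).reverse.flatten =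
      (List.range (8 * k)).map (fun j => data.getD ((k - 1 - j / 8) * 8 + j % 8) 0) := by
  induction k with
  | zero => simp
  | succ k ih =>
    rw [List.range_succ, List.map_append, List.map_singleton, List.reverse_append]
    have h8 : 8 * (k + 1) = 8 + 8 * k := by ring
    rw [h8, List.range_add, List.map_append, List.map_map]
    simp only [List.reverse_singleton, List.singleton_append, List.flatten_cons]
    congr 1
    · -- first 8 outputs come from the last chunk
      unfold pvW
      apply List.map_congr_left
      intro j hj
      rw [List.mem_range] at hj
      rw [Nat.div_eq_of_lt hj, Nat.mod_eq_of_lt hj]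
      congr 1
      omega
    · -- remaining outputs are the k-chunk problem shifted by 8
      rw [ih]
      apply List.map_congr_left
      intro j hj
      simp only [Function.comp]
      have hd : (8 + j) / 8 = 1 + j / 8 := by omega
      have hm : (8 + j) % 8 = j % 8 := by omega
      rw [hd, hm]
      congr 2
      omega

theorem pvAlt_eq (data : List Int) :
    data_reverse_alt data =
      (List.range (8 * (data.length / 8))).map
        (fun j => data.getD ((data.length / 8 - 1 - j / 8) * 8 + j % 8) 0) := by
  simp only [data_reverse_alt]
  have hk : PySem.Int.floordiv (data.length : Int) 8 = ((data.length / 8 : Nat) : Int) := by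
    exact_mod_cast PySem.Int.floordiv_natCast data.length 8
  set K : Nat := data.length / 8 with hK
  rw [hk]
  have hn : (8 : Int) * (K : Int) = ((8 * K : Nat) : Int) := by push_cast; ring
  rw [hn, PySem.List.pyRange_one]
  simp only [Int.sub_zero, Int.toNat_natCast]
  rw [List.map_map]
  apply List.map_congr_left
  intro j hj
  rw [List.mem_range] at hj
  simp only [Function.comp]
  have hz : (0 : Int) + (j : Int) = ((j : Nat) : Int) := by omega
  rw [hz]
  have hd : PySem.Int.floordiv (j : Int) 8 = ((j / 8 : Nat) : Int) := by
    exact_mod_cast PySem.Int.floordiv_natCast j 8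
  have hm : PySem.Int.mod (j : Int) 8 = ((j % 8 : Nat) : Int) := by
    exact_mod_cast PySem.Int.mod_natCast j 8
  rw [hd, hm]
  have hdivlt : j / 8 < K := Nat.div_lt_of_lt_mul (by omega)
  have hidx : ((K : Int) - 1 - ((j / 8 : Nat) : Int)) * 8 + ((j % 8 : Nat) : Int) =
      (((K - 1 - j / 8) * 8 + j % 8 : Nat) : Int) := by push_cast; omega
  rw [hidx, PySem.List.pyGet?_natCast]
  simp [List.getD_eq_getElem?_getD]

-- ===== VERDICT (by name: the statement is the Claim_ definition above) =====
theorem data_reverse_spec : Claim_equal_data_reverse := by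
  intro data _
  unfold Spec_data_reverse
  simp only [data_reverse]
  rw [pvOuter_eq data (data.length / 8)]
  rw [pvRevLoop_eq, pvConcat_eq, List.nil_append, pvMain data (data.length / 8), pvAlt_eq]
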